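-- pv_equiv track=rewrite | github.com/roman-romanov-o/sahaidachny | saha/runners/_utils.py | parse_skill_names
-- ===== SOURCE A (Python) =====
-- def _parse_inline_skills(line: str) -> list[str]:
--     """Parse comma-separated skill names from a 'skills: a, b' line."""
--     value = line.split(":", 1)[1].strip()
--     if not value:
--         return []
--     return [s.strip() for s in value.split(",") if s.strip()]
--
-- def _parse_yaml_list_skills(lines: list[str], start_idx: int) -> tuple[list[str], int]:
--     """Parse YAML list items following a bare 'skills:' key.
--
--     Args:
--         lines: All frontmatter lines.
--         start_idx: Index of the first line after the 'skills:' key.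
--
--     Returns:
--         Tuple of (skill names, next index to resume parsing).
--     """
--     skills: list[str] = []
--     i = start_idx
--     while i < len(lines):
--         item = lines[i].strip()
--         if not item:
--             i += 1
--             continue
--         if item.startswith("-"):
--             skill = item[1:].strip()
--             if skill:
--                 skills.append(skill)
--             i += 1
--             continue
--         # Hit a new YAML key or non-list line
--         break
--     return skills, i
--
-- def parse_skill_names(frontmatter: str) -> list[str]:
--     """Parse skill names from YAML frontmatter text.
--
--     Supports both inline format (skills: ruff, ty) and YAML list format.
--
--     Args:
--         frontmatter: YAML frontmatter content (without --- delimiters).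
--
--     Returns:
--         List of skill names.
--     """
--     if not frontmatter:
--         return []
--
--     skills: list[str] = []
--     lines = frontmatter.splitlines()
--     i = 0
--     while i < len(lines):
--         line = lines[i].strip()
--         if not line or line.startswith("#") or not line.startswith("skills:"):
--             i += 1
--             continue
--
--         inline = _parse_inline_skills(line)
--         if inline:
--             skills.extend(inline)
--             i += 1
--             continue
--
--         yaml_skills, i = _parse_yaml_list_skills(lines, i + 1)
--         skills.extend(yaml_skills)
--
--     return skills
-- ===== SOURCE B (Python) =====
-- def parse_skill_names(frontmatter: str) -> list[str]:
--     """Parse skill names from YAML frontmatter text (inline or YAML-list form).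
--
--     Single flat pass over the lines with a `collecting` flag instead of
--     nested index-threading helpers.
--     """
--     skills: list[str] = []
--     collecting = False
--     for raw in frontmatter.splitlines():
--         line = raw.strip()
--         if collecting:
--             if not line:
--                 continue
--             if line.startswith("-"):
--                 item = line[1:].strip()
--                 if item:
--                     skills.append(item)
--                 continue
--             collecting = False  # list ended: fall through to the normal path
--         if not line or line.startswith("#") or not line.startswith("skills:"):
--             continue
--         value = line.split(":", 1)[1].strip()
--         inline = [s.strip() for s in value.split(",") if s.strip()]
--         if inline:
--             skills.extend(inline)
--         else:
--             collecting = True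
--     return skills
-- ===== Notes on version B (the rewrite author's own statement) =====
-- stated objective: simpler
-- what changed: Replaced the nested index-threading helpers (outer while over indices plus a separate inner while that returns a resume index) by one flat pass over the lines maintaining a boolean `collecting` flag, with list-breaking lines falling through to the normal per-line path.
import Mathlib
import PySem

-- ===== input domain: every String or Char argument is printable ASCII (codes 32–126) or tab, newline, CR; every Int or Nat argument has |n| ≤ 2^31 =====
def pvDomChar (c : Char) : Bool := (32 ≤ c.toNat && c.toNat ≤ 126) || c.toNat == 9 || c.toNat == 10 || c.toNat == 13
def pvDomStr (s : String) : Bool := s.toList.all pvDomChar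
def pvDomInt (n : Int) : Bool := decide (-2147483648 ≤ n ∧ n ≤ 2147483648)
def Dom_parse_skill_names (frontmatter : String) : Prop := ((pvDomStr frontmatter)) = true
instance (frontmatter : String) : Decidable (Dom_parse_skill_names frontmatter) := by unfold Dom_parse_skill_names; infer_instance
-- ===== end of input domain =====

-- B replaces A's nested index-threading helper loops by one flat fold over the lines
-- with a `collecting` flag (objective: simpler decomposition; same O(n) cost).

-- ===== PORT A =====

-- _parse_inline_skills; the `[1]` index is in range whenever ':' occurs in `line`
-- (A only calls it on lines starting with "skills:"), so the `.getD ""` default never fires.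
def pvInlineA (line : String) : List String :=
  let value := PySem.Str.strip ((PySem.List.pyGet? ((PySem.Str.splitMax? line ":" 1).getD []) (1 : Int)).getD "")
  if value = "" then []
  else (((PySem.Str.split? value ",").getD []).map PySem.Str.strip).filter (fun s => s ≠ "")

-- _parse_yaml_list_skills (returns the collected skills and the resume index)
def pvYamlA (lines : List String) (i : Nat) : List String × Nat :=
  if h : i < lines.length then
    let item := PySem.Str.strip lines[i]
    if item = "" then pvYamlA lines (i + 1)
    else if PySem.Str.startswith item "-" then
      let skill := PySem.Str.strip (PySem.Str.slice item (some 1) none)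
      let r := pvYamlA lines (i + 1)
      (if skill ≠ "" then skill :: r.1 else r.1, r.2)
    else ([], i)
  else ([], i)
termination_by lines.length - i

-- unfolding equation of pvYamlA in the in-range case (cited by pvYamlA_snd_ge,
-- which the port pvLoopA needs for termination)
theorem pvYamlA_eq (lines : List String) (i : Nat) (h : i < lines.length) :
    pvYamlA lines i =
      if PySem.Str.strip lines[i] = "" then pvYamlA lines (i + 1)
      else if PySem.Str.startswith (PySem.Str.strip lines[i]) "-" then
        (if PySem.Str.strip (PySem.Str.slice (PySem.Str.strip lines[i]) (some 1) none) ≠ "" then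
           PySem.Str.strip (PySem.Str.slice (PySem.Str.strip lines[i]) (some 1) none) :: (pvYamlA lines (i + 1)).1
         else (pvYamlA lines (i + 1)).1, (pvYamlA lines (i + 1)).2)
      else ([], i) := by
  rw [pvYamlA, dif_pos h]

-- the resume index never moves backwards (used for the outer loop's termination)
theorem pvYamlA_snd_ge (lines : List String) (i : Nat) : i ≤ (pvYamlA lines i).2 := by
  by_cases h : i < lines.length
  · rw [pvYamlA_eq lines i h]
    by_cases h1 : PySem.Str.strip lines[i] = ""
    · rw [if_pos h1]; have := pvYamlA_snd_ge lines (i + 1); omega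
    · rw [if_neg h1]
      by_cases h2 : PySem.Str.startswith (PySem.Str.strip lines[i]) "-"
      · rw [if_pos h2]; have := pvYamlA_snd_ge lines (i + 1)
        by_cases h3 : PySem.Str.strip (PySem.Str.slice (PySem.Str.strip lines[i]) (some 1) none) ≠ ""
        · rw [if_pos h3]; omega
        · rw [if_neg h3]; omega
      · rw [if_neg h2]
  · rw [pvYamlA, dif_neg h]
termination_by lines.length - i

-- the outer while-loop of parse_skill_names
def pvLoopA (lines : List String) (i : Nat) (skills : List String) : List String :=
  if h : i < lines.length then
    let line := PySem.Str.strip lines[i]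
    if line = "" || PySem.Str.startswith line "#" || !PySem.Str.startswith line "skills:" then
      pvLoopA lines (i + 1) skills
    else
      let inline := pvInlineA line
      if inline ≠ [] then pvLoopA lines (i + 1) (skills ++ inline)
      else
        let r := pvYamlA lines (i + 1)
        pvLoopA lines r.2 (skills ++ r.1)
  else skills
termination_by lines.length - i
decreasing_by
  · omega
  · omega
  · have := pvYamlA_snd_ge lines (i + 1); omega

def parse_skill_names (frontmatter : String) : List String :=
  if frontmatter = "" then []
  else pvLoopA (PySem.Str.splitlines frontmatter) 0 []

-- ===== PORT B =====

-- the "normal path" of B's loop body (blank/comment/other keys skipped; a 'skills:' line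
-- either extends the result inline or switches the collecting flag on); the `[1]` index is
-- in range whenever ':' occurs in `line`, so the `.getD ""` default never fires.
def pvNormB (skills : List String) (line : String) : List String × Bool :=
  if line = "" || PySem.Str.startswith line "#" || !PySem.Str.startswith line "skills:" then
    (skills, false)
  else
    let value := PySem.Str.strip ((PySem.List.pyGet? ((PySem.Str.splitMax? line ":" 1).getD []) (1 : Int)).getD "")
    let inline := (((PySem.Str.split? value ",").getD []).map PySem.Str.strip).filter (fun s => s ≠ "")
    if inline ≠ [] then (skills ++ inline, false) else (skills, true)

-- one iteration of B's flat for-loop; state = (skills so far, collecting flag)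
def pvStepB (st : List String × Bool) (raw : String) : List String × Bool :=
  let line := PySem.Str.strip raw
  if st.2 then
    if line = "" then st
    else if PySem.Str.startswith line "-" then
      let item := PySem.Str.strip (PySem.Str.slice line (some 1) none)
      (if item ≠ "" then st.1 ++ [item] else st.1, true)
    else pvNormB st.1 line
  else pvNormB st.1 line

def parse_skill_names_alt (frontmatter : String) : List String :=
  ((PySem.Str.splitlines frontmatter).foldl pvStepB ([], false)).1

-- ===== PRECONDITION & SPEC =====
def Spec_parse_skill_names (frontmatter : String) (out : List String) : Prop := out = parse_skill_names_alt frontmatter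
instance (frontmatter : String) (out : List String) : Decidable (Spec_parse_skill_names frontmatter out) := by unfold Spec_parse_skill_names; infer_instance

-- ===== CLAIM (what is proved, stated in full; the proofs are below) =====
def Claim_equal_parse_skill_names : Prop := ∀ (frontmatter : String), Dom_parse_skill_names frontmatter → Spec_parse_skill_names frontmatter (parse_skill_names frontmatter)

-- ===== LEMMAS AND PROOFS =====

-- A's inline helper computes exactly B's filtered list (splitting "" on "," gives [""],
-- which the filter removes, so A's early-[] branch is redundant).
theorem pvInlineA_eq (line : String) :
    pvInlineA line =
      (((PySem.Str.split? (PySem.Str.strip ((PySem.List.pyGet? ((PySem.Str.splitMax? line ":" 1).getD []) (1 : Int)).getD "")) ",").getD []).map PySem.Str.strip).filter (fun s => s ≠ "") := by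
  unfold pvInlineA
  set value := PySem.Str.strip ((PySem.List.pyGet? ((PySem.Str.splitMax? line ":" 1).getD []) (1 : Int)).getD "") with hv
  by_cases h : value = ""
  · rw [h]
    simp only [if_pos]
    decide
  · rw [if_neg h]

-- the shared "process line i through the normal path" step, parametrised by the
-- induction hypothesis at i+1
theorem pvNormStep (lines : List String) (i : Nat) (h : i < lines.length)
    (IH : ∀ skills : List String,
      pvLoopA lines (i + 1) skills = ((lines.drop (i + 1)).foldl pvStepB (skills, false)).1 ∧
      pvLoopA lines (pvYamlA lines (i + 1)).2 (skills ++ (pvYamlA lines (i + 1)).1) =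
        ((lines.drop (i + 1)).foldl pvStepB (skills, true)).1)
    (skills : List String) :
    pvLoopA lines i skills = ((lines.drop (i + 1)).foldl pvStepB (pvNormB skills (PySem.Str.strip lines[i]))).1 := by
  rw [pvLoopA, dif_pos h]
  set line := PySem.Str.strip lines[i] with hl
  unfold pvNormB
  by_cases hskip : (line = "" || PySem.Str.startswith line "#" || !PySem.Str.startswith line "skills:") = true
  · rw [if_pos hskip, if_pos hskip]
    exact (IH skills).1
  · rw [if_neg hskip, if_neg hskip]
    rw [pvInlineA_eq]
    set inline := (((PySem.Str.split? (PySem.Str.strip ((PySem.List.pyGet? ((PySem.Str.splitMax? line ":" 1).getD []) (1 : Int)).getD "")) ",").getD []).map PySem.Str.strip).filter (fun s => s ≠ "") with hi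
    by_cases hin : inline ≠ []
    · rw [if_pos hin, if_pos hin]
      exact (IH (skills ++ inline)).1
    · rw [if_neg hin, if_neg hin]
      exact (IH skills).2

-- main invariant: A's index loop from i (and A's yaml-list mode from i) agree with
-- B's fold over the remaining lines with collecting = false (resp. true)
theorem pvMain (lines : List String) (n : Nat) :
    ∀ i, lines.length - i ≤ n → ∀ skills : List String,
      pvLoopA lines i skills = ((lines.drop i).foldl pvStepB (skills, false)).1 ∧
      pvLoopA lines (pvYamlA lines i).2 (skills ++ (pvYamlA lines i).1) =
        ((lines.drop i).foldl pvStepB (skills, true)).1 := by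
  induction n with
  | zero =>
    intro i hle skills
    have hge : lines.length ≤ i := by omega
    have hdrop : lines.drop i = [] := List.drop_eq_nil_of_le hge
    have hnl : ¬ i < lines.length := by omega
    constructor
    · rw [pvLoopA, dif_neg hnl, hdrop]; rfl
    · rw [pvYamlA, dif_neg hnl]
      simp only [List.append_nil]
      rw [pvLoopA, dif_neg hnl, hdrop]; rfl
  | succ n ih =>
    intro i hle skills
    by_cases h : i < lines.length
    · have hIH : ∀ skills : List String,
        pvLoopA lines (i + 1) skills = ((lines.drop (i + 1)).foldl pvStepB (skills, false)).1 ∧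
        pvLoopA lines (pvYamlA lines (i + 1)).2 (skills ++ (pvYamlA lines (i + 1)).1) =
          ((lines.drop (i + 1)).foldl pvStepB (skills, true)).1 := by
        intro sk; exact ih (i + 1) (by omega) sk
      have hdrop : lines.drop i = lines[i] :: lines.drop (i + 1) :=
        List.drop_eq_getElem_cons h
      constructor
      · -- collecting = false
        rw [hdrop]
        simp only [List.foldl_cons]
        have hstep : pvStepB (skills, false) lines[i] = pvNormB skills (PySem.Str.strip lines[i]) := rfl
        rw [hstep]
        exact pvNormStep lines i h hIH skills
      · -- collecting = true
        rw [hdrop]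
        simp only [List.foldl_cons]
        have hstep : pvStepB (skills, true) lines[i] =
            (if PySem.Str.strip lines[i] = "" then (skills, true)
             else if PySem.Str.startswith (PySem.Str.strip lines[i]) "-" then
               (if PySem.Str.strip (PySem.Str.slice (PySem.Str.strip lines[i]) (some 1) none) ≠ "" then
                  skills ++ [PySem.Str.strip (PySem.Str.slice (PySem.Str.strip lines[i]) (some 1) none)]
                else skills, true)
             else pvNormB skills (PySem.Str.strip lines[i])) := rfl
        rw [hstep, pvYamlA_eq lines i h]
        by_cases hb : PySem.Str.strip lines[i] = ""
        · rw [if_pos hb, if_pos hb]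
          exact (hIH skills).2
        · rw [if_neg hb, if_neg hb]
          by_cases hd : PySem.Str.startswith (PySem.Str.strip lines[i]) "-"
          · rw [if_pos hd, if_pos hd]
            by_cases hsk : PySem.Str.strip (PySem.Str.slice (PySem.Str.strip lines[i]) (some 1) none) ≠ ""
            · rw [if_pos hsk, if_pos hsk]
              have := (hIH (skills ++ [PySem.Str.strip (PySem.Str.slice (PySem.Str.strip lines[i]) (some 1) none)])).2
              simpa [List.append_assoc] using this
            · rw [if_neg hsk, if_neg hsk]
              exact (hIH skills).2
          · rw [if_neg hd, if_neg hd]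
            simpa using pvNormStep lines i h hIH skills
    · -- i ≥ length: same as the base case
      have hdrop : lines.drop i = [] := List.drop_eq_nil_of_le (by omega)
      have hnl : ¬ i < lines.length := h
      constructor
      · rw [pvLoopA, dif_neg hnl, hdrop]; rfl
      · rw [pvYamlA, dif_neg hnl]
        simp only [List.append_nil]
        rw [pvLoopA, dif_neg hnl, hdrop]; rfl

-- ===== VERDICT (by name: the statement is the Claim_ definition above) =====
theorem parse_skill_names_spec : Claim_equal_parse_skill_names := by
  intro fm _
  unfold Spec_parse_skill_names parse_skill_names parse_skill_names_alt
  by_cases h : fm = ""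
  · rw [if_pos h, h]; decide
  · rw [if_neg h]
    have := (pvMain (PySem.Str.splitlines fm) (PySem.Str.splitlines fm).length 0 (by omega) []).1
    simpa using this
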